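-- pv_equiv track=rewrite | github.com/dmfed/advent-of-code-2023 | day1/day1.py | replace_word_with_digit
-- ===== SOURCE A (Python) =====
-- digits_dict = {
--     'one': '1',
--     'two': '2',
--     'three': '3',
--     'four': '4',
--     'five': '5',
--     'six': '6',
--     'seven': '7',
--     'eight': '8',
--     'nine': '9'
-- }
--
-- def replace_word_with_digit(line):
--     start, end, step = 0, len(line), 1
--     found = False
--     for i in range(start, end, step):
--         for word in digits_dict.keys():
--             if line[i:].startswith(word):
--                 # just inserting the digit so that our
--                 # find_digit func can help with the rest
--                 line = line[:i] + digits_dict[word] + line[i:]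
--                 found = True
--                 break
--         if found:
--             break
--
--     start, end, step = len(line), -1, -1
--     found = False
--     for i in range(start, end, step):
--         for word in digits_dict.keys():
--             if line[:i].endswith(word):
--                 line = line[:i] + digits_dict[word]+line[i:]
--                 found = True
--                 break
--         if found:
--             break
--     return line
-- ===== SOURCE B (Python) =====
-- digits_dict = {
--     'one': '1',
--     'two': '2',
--     'three': '3',
--     'four': '4',
--     'five': '5',
--     'six': '6',
--     'seven': '7',
--     'eight': '8',
--     'nine': '9'
-- }
--
-- def replace_word_with_digit(line):
--     # One pass over the nine words (not over string positions):
--     # earliest occurrence start via find, then latest occurrence end via rfind.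
--     first = None
--     for word, digit in digits_dict.items():
--         p = line.find(word)
--         if p != -1 and (first is None or p < first[0]):
--             first = (p, digit)
--     if first is None:
--         return line
--     p, d1 = first
--     line = line[:p] + d1 + line[p:]
--     last = None
--     for word, digit in digits_dict.items():
--         q = line.rfind(word)
--         if q != -1 and (last is None or q + len(word) > last[0]):
--             last = (q + len(word), digit)
--     e, d2 = last
--     return line[:e] + d2 + line[e:]
-- ===== Notes on version B (the rewrite author's own statement) =====
-- stated objective: faster
-- what changed: B loops once over the nine spelled words using built-in find/rfind (earliest start, latest end = rfind+len) instead of A's positional scans over every string index with per-index slicing and word checks.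
import Mathlib
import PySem

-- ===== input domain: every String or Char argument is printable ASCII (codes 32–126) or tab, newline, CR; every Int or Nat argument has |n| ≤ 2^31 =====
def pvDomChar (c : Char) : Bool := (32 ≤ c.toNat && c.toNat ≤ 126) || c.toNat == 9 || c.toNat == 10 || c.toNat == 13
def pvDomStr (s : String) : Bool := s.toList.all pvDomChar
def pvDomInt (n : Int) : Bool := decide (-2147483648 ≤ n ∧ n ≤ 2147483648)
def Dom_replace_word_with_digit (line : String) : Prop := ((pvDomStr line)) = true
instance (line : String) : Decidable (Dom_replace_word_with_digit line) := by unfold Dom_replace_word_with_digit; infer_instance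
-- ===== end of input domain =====

-- B replaces A's two positional scans (every string index, per-index slice + word check) by one pass
-- over the nine spelled words using find/rfind (earliest start, latest end); measured faster at large sizes.

-- ===== PORT A =====
-- digits_dict, in insertion order, as (word, digit) pairs over List Char
def pvWords : List (List Char × Char) :=
  [(['o','n','e'], '1'), (['t','w','o'], '2'), (['t','h','r','e','e'], '3'),
   (['f','o','u','r'], '4'), (['f','i','v','e'], '5'), (['s','i','x'], '6'),
   (['s','e','v','e','n'], '7'), (['e','i','g','h','t'], '8'), (['n','i','n','e'], '9')]

-- inner loop 'for word in digits_dict.keys(): if line[i:].startswith(word): … break'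
-- (i ≥ 0 throughout, so line[i:] is s.drop i and line[:i] is s.take i — exact for non-negative indices)
def pvStartHit (s : List Char) (i : Nat) : Option (List Char × Char) :=
  pvWords.find? (fun wd => PySem.Chars.startswith (s.drop i) wd.1)

-- 'for i in range(0, len(line), 1)' with break-on-found; insertion is line[:i]+digit+line[i:]
def pvFwd (s : List Char) (i : Nat) : List Char :=
  if _h : i < s.length then
    match pvStartHit s i with
    | some wd => s.take i ++ wd.2 :: s.drop i
    | none => pvFwd s (i + 1)
  else s
termination_by s.length - i

-- inner loop 'if line[:i].endswith(word): … break'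
def pvEndHit (s : List Char) (i : Nat) : Option (List Char × Char) :=
  pvWords.find? (fun wd => PySem.Chars.endswith (s.take i) wd.1)

-- 'for i in range(len(line), -1, -1)' with break-on-found
def pvBwd (s : List Char) (i : Nat) : List Char :=
  match pvEndHit s i with
  | some wd => s.take i ++ wd.2 :: s.drop i
  | none => match i with
    | 0 => s
    | j + 1 => pvBwd s j

def replace_word_with_digit (line : String) : String :=
  let s1 := pvFwd line.toList 0
  String.ofList (pvBwd s1 s1.length)

-- ===== PORT B =====
-- loop body of Source B's first pass: p = line.find(word); keep the running best on strict '<'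
def pvStepF (s : List Char) (acc : Option (Int × Char)) (wd : List Char × Char) : Option (Int × Char) :=
  if PySem.Chars.find s wd.1 = -1 then acc
  else match acc with
    | none => some (PySem.Chars.find s wd.1, wd.2)
    | some (q, _) => if PySem.Chars.find s wd.1 < q then some (PySem.Chars.find s wd.1, wd.2) else acc

def pvBestStart (s : List Char) : Option (Int × Char) :=
  pvWords.foldl (pvStepF s) none

-- loop body of Source B's second pass: q = line.rfind(word); best end q+len(word) on strict '>'
def pvStepB (s : List Char) (acc : Option (Int × Char)) (wd : List Char × Char) : Option (Int × Char) :=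
  if PySem.Chars.rfind s wd.1 = -1 then acc
  else match acc with
    | none => some (PySem.Chars.rfind s wd.1 + wd.1.length, wd.2)
    | some (e0, _) => if e0 < PySem.Chars.rfind s wd.1 + wd.1.length
        then some (PySem.Chars.rfind s wd.1 + wd.1.length, wd.2) else acc

def pvBestEnd (s : List Char) : Option (Int × Char) :=
  pvWords.foldl (pvStepB s) none

def replace_word_with_digit_alt (line : String) : String :=
  let s := line.toList
  match pvBestStart s with
  | none => line
  | some (p, d1) =>
    -- p = line.find(word) ≥ 0 here, so line[:p]+d1+line[p:] is take/cons/drop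
    let s1 := s.take p.toNat ++ d1 :: s.drop p.toNat
    match pvBestEnd s1 with
    | none => String.ofList s1
    | some (e, d2) => String.ofList (s1.take e.toNat ++ d2 :: s1.drop e.toNat)

-- ===== PRECONDITION & SPEC =====
def Spec_replace_word_with_digit (line : String) (out : String) : Prop := out = replace_word_with_digit_alt line
instance (line : String) (out : String) : Decidable (Spec_replace_word_with_digit line out) := by unfold Spec_replace_word_with_digit; infer_instance

-- ===== CLAIM (what is proved, stated in full; the proofs are below) =====
def Claim_equal_replace_word_with_digit : Prop := ∀ (line : String), Dom_replace_word_with_digit line → Spec_replace_word_with_digit line (replace_word_with_digit line)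

-- ===== LEMMAS AND PROOFS =====

-- facts about the nine fixed words
lemma pvWords_ne_nil : ∀ wd ∈ pvWords, wd.1 ≠ [] := by decide

lemma pvWords_prefix_eq : ∀ wd ∈ pvWords, ∀ wd' ∈ pvWords, wd.1 <+: wd'.1 → wd = wd' := by decide

lemma pvWords_suffix_eq : ∀ wd ∈ pvWords, ∀ wd' ∈ pvWords, wd.1 <:+ wd'.1 → wd = wd' := by decide

-- at most one word matches at a given position / ends at a given position
lemma pvUniqStart {s : List Char} {j : Nat} {wd wd' : List Char × Char}
    (h1 : wd ∈ pvWords) (h2 : wd' ∈ pvWords)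
    (p1 : wd.1 <+: s.drop j) (p2 : wd'.1 <+: s.drop j) : wd = wd' := by
  rcases le_total wd.1.length wd'.1.length with h | h
  · exact pvWords_prefix_eq wd h1 wd' h2 (List.prefix_of_prefix_length_le p1 p2 h)
  · exact (pvWords_prefix_eq wd' h2 wd h1 (List.prefix_of_prefix_length_le p2 p1 h)).symm

lemma pvUniqEnd {s : List Char} {i : Nat} {wd wd' : List Char × Char}
    (h1 : wd ∈ pvWords) (h2 : wd' ∈ pvWords)
    (p1 : wd.1 <:+ s.take i) (p2 : wd'.1 <:+ s.take i) : wd = wd' := by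
  rcases le_total wd.1.length wd'.1.length with h | h
  · exact pvWords_suffix_eq wd h1 wd' h2 (List.suffix_of_suffix_length_le p1 p2 h)
  · exact (pvWords_suffix_eq wd' h2 wd h1 (List.suffix_of_suffix_length_le p2 p1 h)).symm

-- characterizations of the inner loops
lemma pvStartHit_none_iff {s : List Char} {i : Nat} :
    pvStartHit s i = none ↔ ∀ wd ∈ pvWords, ¬ wd.1 <+: s.drop i := by
  simp [pvStartHit, List.find?_eq_none, PySem.Chars.startswith_iff]

lemma pvStartHit_some {s : List Char} {i : Nat} {wd : List Char × Char}
    (h : pvStartHit s i = some wd) : wd ∈ pvWords ∧ wd.1 <+: s.drop i := by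
  refine ⟨List.mem_of_find?_eq_some h, ?_⟩
  have := List.find?_some h
  rwa [PySem.Chars.startswith_iff] at this

lemma pvEndHit_none_iff {s : List Char} {i : Nat} :
    pvEndHit s i = none ↔ ∀ wd ∈ pvWords, ¬ wd.1 <:+ s.take i := by
  simp [pvEndHit, List.find?_eq_none, PySem.Chars.endswith_iff]

lemma pvEndHit_some {s : List Char} {i : Nat} {wd : List Char × Char}
    (h : pvEndHit s i = some wd) : wd ∈ pvWords ∧ wd.1 <:+ s.take i := by
  refine ⟨List.mem_of_find?_eq_some h, ?_⟩
  have := List.find?_some h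
  rwa [PySem.Chars.endswith_iff] at this

-- A's forward loop
lemma pvFwd_of_none (s : List Char) : ∀ n i, s.length - i ≤ n →
    (∀ j, i ≤ j → pvStartHit s j = none) → pvFwd s i = s := by
  intro n
  induction n with
  | zero =>
    intro i hn _
    rw [pvFwd, dif_neg (by omega)]
  | succ n ih =>
    intro i hn hnone
    rw [pvFwd]
    by_cases hlt : i < s.length
    · rw [dif_pos hlt, hnone i le_rfl]
      exact ih (i + 1) (by omega) (fun j hj => hnone j (by omega))
    · rw [dif_neg hlt]

lemma pvFwd_of_hit (s : List Char) : ∀ n i j0 wd0, j0 - i ≤ n → i ≤ j0 → j0 < s.length →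
    pvStartHit s j0 = some wd0 → (∀ j, i ≤ j → j < j0 → pvStartHit s j = none) →
    pvFwd s i = s.take j0 ++ wd0.2 :: s.drop j0 := by
  intro n
  induction n with
  | zero =>
    intro i j0 wd0 hn hij hj0 hhit _
    have hi : i = j0 := by omega
    subst hi
    rw [pvFwd, dif_pos hj0, hhit]
  | succ n ih =>
    intro i j0 wd0 hn hij hj0 hhit hmin
    by_cases hi : i = j0
    · subst hi
      rw [pvFwd, dif_pos hj0, hhit]
    · rw [pvFwd, dif_pos (by omega), hmin i le_rfl (by omega)]
      exact ih (i + 1) j0 wd0 (by omega) (by omega) hj0 hhit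
        (fun j hj hj' => hmin j (by omega) hj')

-- A's backward loop
lemma pvBwd_of_none (s : List Char) : ∀ i, (∀ i', i' ≤ i → pvEndHit s i' = none) → pvBwd s i = s := by
  intro i
  induction i with
  | zero => intro h; rw [pvBwd, h 0 le_rfl]
  | succ j ih =>
    intro h
    rw [pvBwd, h (j + 1) le_rfl]
    exact ih (fun i' hi' => h i' (by omega))

lemma pvBwd_of_hit (s : List Char) : ∀ i i1 wd1, i1 ≤ i → pvEndHit s i1 = some wd1 →
    (∀ i', i1 < i' → i' ≤ i → pvEndHit s i' = none) →
    pvBwd s i = s.take i1 ++ wd1.2 :: s.drop i1 := by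
  intro i
  induction i with
  | zero =>
    intro i1 wd1 hi1 hhit _
    have : i1 = 0 := by omega
    subst this
    rw [pvBwd, hhit]
  | succ j ih =>
    intro i1 wd1 hi1 hhit hmax
    by_cases hej : i1 = j + 1
    · subst hej
      rw [pvBwd, hhit]
    · rw [pvBwd, hmax (j + 1) (by omega) le_rfl]
      exact ih i1 wd1 (by omega) hhit (fun i' h1 h2 => hmax i' h1 (by omega))

-- find: position facts
lemma pvFind_le_of_prefix {s w : List Char} {j : Nat} (h : w <+: s.drop j) :
    0 ≤ PySem.Chars.find s w ∧ PySem.Chars.find s w ≤ (j : Int) := by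
  have hinf : w <:+: s := h.isInfix.trans (List.drop_suffix j s).isInfix
  have hne : PySem.Chars.find s w ≠ -1 := by
    intro hc
    exact (PySem.Chars.find_eq_neg_one_iff s w).mp hc hinf
  have h0 : 0 ≤ PySem.Chars.find s w := by
    have := PySem.Chars.neg_one_le_find s w
    omega
  obtain ⟨-, hmin⟩ := PySem.Chars.find_spec h0
  refine ⟨h0, ?_⟩
  by_contra hc
  push Not at hc
  exact hmin j (by omega) h

-- bridge between 'word ends at i' (A's endswith on take i) and 'word starts at j' (B's rfind)
lemma pvPrefix_bound {s w : List Char} (hw : w ≠ []) {j : Nat} (h : w <+: s.drop j) :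
    j + w.length ≤ s.length := by
  by_cases hjl : s.length ≤ j
  · rw [List.drop_eq_nil_iff.mpr hjl, List.prefix_nil] at h
    exact absurd h hw
  · have := h.length_le
    rw [List.length_drop] at this
    omega

lemma pvEnds_iff {s w : List Char} {i : Nat} (hi : i ≤ s.length) :
    w <:+ s.take i ↔ w.length ≤ i ∧ w <+: s.drop (i - w.length) := by
  constructor
  · rintro ⟨t, ht⟩
    have hlen : t.length + w.length = i := by
      have := congrArg List.length ht
      simp only [List.length_append, List.length_take] at this
      omega
    refine ⟨by omega, ?_⟩
    have hdec : s.drop (i - w.length) = w ++ s.drop i := by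
      conv_lhs => rw [← List.take_append_drop i s]
      rw [List.drop_append]
      have h1 : List.drop (i - w.length) (s.take i) = w := by
        rw [← ht, List.drop_append]
        have ht1 : List.drop (i - w.length) t = [] := by
          rw [List.drop_eq_nil_iff]
          omega
        rw [ht1]
        have : i - w.length - t.length = 0 := by omega
        rw [this]
        simp
      rw [h1, List.length_take]
      have : i - w.length - min i s.length = 0 := by omega
      rw [this]
      simp
    exact ⟨s.drop i, hdec.symm⟩
  · rintro ⟨hlen, r, hr⟩
    refine ⟨s.take (i - w.length), ?_⟩
    have : s.take i = s.take (i - w.length) ++ w := by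
      have hi' : i = (i - w.length) + w.length := by omega
      rw [hi', List.take_add, ← hr, List.take_left' rfl]
      have harg : i - w.length + w.length - w.length = i - w.length := by omega
      rw [harg]
    exact this.symm

-- rfind: my own characterization (PySem states none); Python rfind = highest match position
lemma pvRfindGo_spec (s sub : List Char) : ∀ j : Nat,
    (PySem.Chars.rfind.go s sub j = -1 ∧ ∀ i ≤ j, ¬ sub <+: s.drop i) ∨
    (∃ i ≤ j, PySem.Chars.rfind.go s sub j = (i : Int) ∧ sub <+: s.drop i ∧
      ∀ i', i < i' → i' ≤ j → ¬ sub <+: s.drop i') := by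
  intro j
  induction j with
  | zero =>
    by_cases h : sub.isPrefixOf s
    · refine Or.inr ⟨0, le_rfl, ?_, ?_, ?_⟩
      · rw [PySem.Chars.rfind.go]; simp [h]
      · simpa using List.isPrefixOf_iff_prefix.mp h
      · intro i' h1 h2; omega
    · refine Or.inl ⟨?_, ?_⟩
      · rw [PySem.Chars.rfind.go]; simp [h]
      · intro i hi
        interval_cases i
        simpa using fun hc => h (List.isPrefixOf_iff_prefix.mpr hc)
  | succ j ih =>
    by_cases h : sub.isPrefixOf (s.drop (j + 1))
    · refine Or.inr ⟨j + 1, le_rfl, ?_, List.isPrefixOf_iff_prefix.mp h, ?_⟩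
      · rw [PySem.Chars.rfind.go]; simp [h]
      · intro i' h1 h2; omega
    · have hgo : PySem.Chars.rfind.go s sub (j + 1) = PySem.Chars.rfind.go s sub j := by
        rw [PySem.Chars.rfind.go]; simp [h]
      have hnot : ¬ sub <+: s.drop (j + 1) := fun hc => h (List.isPrefixOf_iff_prefix.mpr hc)
      rcases ih with ⟨hval, hall⟩ | ⟨i, hij, hval, hpre, hmax⟩
      · refine Or.inl ⟨by rw [hgo, hval], ?_⟩
        intro i hi
        rcases Nat.lt_or_ge i (j + 1) with h1 | h1
        · exact hall i (by omega)
        · have : i = j + 1 := by omega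
          subst this
          exact hnot
      · refine Or.inr ⟨i, by omega, by rw [hgo, hval], hpre, ?_⟩
        intro i' h1 h2
        rcases Nat.lt_or_ge i' (j + 1) with h3 | h3
        · exact hmax i' h1 (by omega)
        · have : i' = j + 1 := by omega
          subst this
          exact hnot

lemma pvRfind_spec (s sub : List Char) (hsub : sub ≠ []) :
    (PySem.Chars.rfind s sub = -1 ∧ ∀ i, ¬ sub <+: s.drop i) ∨
    (∃ i, i + sub.length ≤ s.length ∧ PySem.Chars.rfind s sub = (i : Int) ∧ sub <+: s.drop i ∧
      ∀ i', i < i' → ¬ sub <+: s.drop i') := by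
  have hgo : PySem.Chars.rfind s sub = PySem.Chars.rfind.go s sub s.length := rfl
  have hbig : ∀ i', s.length < i' → ¬ sub <+: s.drop i' := by
    intro i' hi' hc
    rw [List.drop_eq_nil_iff.mpr (by omega), List.prefix_nil] at hc
    exact hsub hc
  rcases pvRfindGo_spec s sub s.length with ⟨hval, hall⟩ | ⟨i, hile, hval, hpre, hmax⟩
  · refine Or.inl ⟨by rw [hgo, hval], ?_⟩
    intro i
    rcases Nat.lt_or_ge s.length i with h1 | h1
    · exact hbig i h1
    · exact hall i h1
  · refine Or.inr ⟨i, ?_, by rw [hgo, hval], hpre, ?_⟩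
    · exact pvPrefix_bound hsub hpre
    · intro i' h1
      rcases Nat.lt_or_ge s.length i' with h2 | h2
      · exact hbig i' h2
      · exact hmax i' h1 h2

-- B's folds: constancy when nothing is found
lemma pvFoldF_const (s : List Char) (ws : List (List Char × Char)) (acc : Option (Int × Char))
    (h : ∀ wd ∈ ws, PySem.Chars.find s wd.1 = -1) : ws.foldl (pvStepF s) acc = acc := by
  induction ws generalizing acc with
  | nil => rfl
  | cons w tl ih =>
    rw [List.foldl_cons]
    have hw : pvStepF s acc w = acc := by
      rw [pvStepF.eq_def, if_pos (h w (List.mem_cons_self))]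
    rw [hw]
    exact ih _ (fun wd hwd => h wd (List.mem_cons_of_mem _ hwd))

lemma pvFoldB_const (s : List Char) (ws : List (List Char × Char)) (acc : Option (Int × Char))
    (h : ∀ wd ∈ ws, PySem.Chars.rfind s wd.1 = -1) : ws.foldl (pvStepB s) acc = acc := by
  induction ws generalizing acc with
  | nil => rfl
  | cons w tl ih =>
    rw [List.foldl_cons]
    have hw : pvStepB s acc w = acc := by
      rw [pvStepB.eq_def, if_pos (h w (List.mem_cons_self))]
    rw [hw]
    exact ih _ (fun wd hwd => h wd (List.mem_cons_of_mem _ hwd))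

-- B's first fold computes the minimal find over the occurring words
lemma pvFoldF_spec (s : List Char) : ∀ (ws : List (List Char × Char)) (acc : Option (Int × Char)),
    (ws.foldl (pvStepF s) acc = none → acc = none ∧ ∀ wd ∈ ws, PySem.Chars.find s wd.1 = -1) ∧
    (∀ p d, ws.foldl (pvStepF s) acc = some (p, d) →
      (acc = some (p, d) ∨ ∃ wd ∈ ws, PySem.Chars.find s wd.1 = p ∧ wd.2 = d ∧ p ≠ -1) ∧
      (∀ wd ∈ ws, PySem.Chars.find s wd.1 ≠ -1 → p ≤ PySem.Chars.find s wd.1) ∧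
      (∀ q e, acc = some (q, e) → p ≤ q)) := by
  intro ws
  induction ws with
  | nil =>
    intro acc
    simp only [List.foldl_nil]
    constructor
    · intro h; exact ⟨h, by simp⟩
    · intro p d h
      refine ⟨Or.inl h, by simp, ?_⟩
      intro q e hq
      rw [h] at hq
      simp only [Option.some.injEq, Prod.mk.injEq] at hq
      omega
  | cons w tl ih =>
    intro acc
    simp only [List.foldl_cons]
    have H := ih (pvStepF s acc w)
    -- how the one step can look
    have hstep_cases : (PySem.Chars.find s w.1 = -1 ∧ pvStepF s acc w = acc) ∨
        (PySem.Chars.find s w.1 ≠ -1 ∧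
          ((acc = none ∧ pvStepF s acc w = some (PySem.Chars.find s w.1, w.2)) ∨
           (∃ q0 e0, acc = some (q0, e0) ∧
             ((PySem.Chars.find s w.1 < q0 ∧ pvStepF s acc w = some (PySem.Chars.find s w.1, w.2)) ∨
              (¬ PySem.Chars.find s w.1 < q0 ∧ pvStepF s acc w = acc))))) := by
      rw [pvStepF.eq_def]
      by_cases hf : PySem.Chars.find s w.1 = -1
      · rw [if_pos hf]; exact Or.inl ⟨hf, rfl⟩
      · rw [if_neg hf]
        refine Or.inr ⟨hf, ?_⟩
        cases acc with
        | none => exact Or.inl ⟨rfl, rfl⟩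
        | some qe =>
          obtain ⟨q0, e0⟩ := qe
          by_cases hlt : PySem.Chars.find s w.1 < q0
          · exact Or.inr ⟨q0, e0, rfl, Or.inl ⟨hlt, by simp [hlt]⟩⟩
          · exact Or.inr ⟨q0, e0, rfl, Or.inr ⟨hlt, by simp [hlt]⟩⟩
    constructor
    · intro h
      obtain ⟨hstep, htl⟩ := H.1 h
      have hacc : acc = none ∧ PySem.Chars.find s w.1 = -1 := by
        rcases hstep_cases with ⟨hf, he⟩ | ⟨hf, hcs⟩
        · rw [he] at hstep; exact ⟨hstep, hf⟩
        · exfalso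
          rcases hcs with ⟨-, he⟩ | ⟨q0, e0, ha, ⟨-, he⟩ | ⟨-, he⟩⟩
          · rw [he] at hstep; simp at hstep
          · rw [he] at hstep; simp at hstep
          · rw [he, ha] at hstep; simp at hstep
      refine ⟨hacc.1, ?_⟩
      intro wd hwd
      rcases List.mem_cons.mp hwd with rfl | hm
      · exact hacc.2
      · exact htl wd hm
    · intro p d h
      obtain ⟨hsrc, hmin, haccle⟩ := H.2 p d h
      refine ⟨?_, ?_, ?_⟩
      · rcases hsrc with hs | ⟨wd, hwd, h1, h2, h3⟩
        · rcases hstep_cases with ⟨hf, he⟩ | ⟨hf, hcs⟩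
          · rw [he] at hs; exact Or.inl hs
          · rcases hcs with ⟨-, he⟩ | ⟨q0, e0, ha, ⟨-, he⟩ | ⟨-, he⟩⟩
            · rw [he] at hs
              simp only [Option.some.injEq, Prod.mk.injEq] at hs
              exact Or.inr ⟨w, List.mem_cons_self, hs.1, hs.2, hs.1 ▸ hf⟩
            · rw [he] at hs
              simp only [Option.some.injEq, Prod.mk.injEq] at hs
              exact Or.inr ⟨w, List.mem_cons_self, hs.1, hs.2, hs.1 ▸ hf⟩
            · rw [he] at hs; exact Or.inl hs
        · exact Or.inr ⟨wd, List.mem_cons_of_mem _ hwd, h1, h2, h3⟩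
      · intro wd hwd hne
        rcases List.mem_cons.mp hwd with rfl | hm
        · rcases hstep_cases with ⟨hf, -⟩ | ⟨-, hcs⟩
          · exact absurd hf hne
          · rcases hcs with ⟨-, he⟩ | ⟨q0, e0, ha, ⟨hlt, he⟩ | ⟨hlt, he⟩⟩
            · exact haccle _ _ he
            · exact haccle _ _ he
            · have := haccle q0 e0 (by rw [he, ha])
              omega
        · exact hmin wd hm hne
      · intro q e hq
        rcases hstep_cases with ⟨-, he⟩ | ⟨-, hcs⟩
        · exact haccle q e (by rw [he, hq])
        · rcases hcs with ⟨ha, -⟩ | ⟨q0, e0, ha, ⟨hlt, he⟩ | ⟨hlt, he⟩⟩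
          · rw [ha] at hq; simp at hq
          · rw [ha] at hq
            simp only [Option.some.injEq, Prod.mk.injEq] at hq
            have := haccle _ _ he
            omega
          · rw [ha] at hq
            simp only [Option.some.injEq, Prod.mk.injEq] at hq
            have := haccle q0 e0 (by rw [he, ha])
            omega

-- B's second fold computes the maximal rfind+len over the occurring words
lemma pvFoldB_spec (s : List Char) : ∀ (ws : List (List Char × Char)) (acc : Option (Int × Char)),
    (ws.foldl (pvStepB s) acc = none → acc = none ∧ ∀ wd ∈ ws, PySem.Chars.rfind s wd.1 = -1) ∧
    (∀ e d, ws.foldl (pvStepB s) acc = some (e, d) →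
      (acc = some (e, d) ∨ ∃ wd ∈ ws, PySem.Chars.rfind s wd.1 ≠ -1 ∧
        e = PySem.Chars.rfind s wd.1 + wd.1.length ∧ wd.2 = d) ∧
      (∀ wd ∈ ws, PySem.Chars.rfind s wd.1 ≠ -1 → PySem.Chars.rfind s wd.1 + wd.1.length ≤ e) ∧
      (∀ q e0, acc = some (q, e0) → q ≤ e)) := by
  intro ws
  induction ws with
  | nil =>
    intro acc
    simp only [List.foldl_nil]
    constructor
    · intro h; exact ⟨h, by simp⟩
    · intro e d h
      refine ⟨Or.inl h, by simp, ?_⟩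
      intro q e0 hq
      rw [h] at hq
      simp only [Option.some.injEq, Prod.mk.injEq] at hq
      omega
  | cons w tl ih =>
    intro acc
    simp only [List.foldl_cons]
    have H := ih (pvStepB s acc w)
    have hstep_cases : (PySem.Chars.rfind s w.1 = -1 ∧ pvStepB s acc w = acc) ∨
        (PySem.Chars.rfind s w.1 ≠ -1 ∧
          ((acc = none ∧ pvStepB s acc w = some (PySem.Chars.rfind s w.1 + w.1.length, w.2)) ∨
           (∃ q0 e0, acc = some (q0, e0) ∧
             ((q0 < PySem.Chars.rfind s w.1 + w.1.length ∧
                pvStepB s acc w = some (PySem.Chars.rfind s w.1 + w.1.length, w.2)) ∨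
              (¬ q0 < PySem.Chars.rfind s w.1 + w.1.length ∧ pvStepB s acc w = acc))))) := by
      rw [pvStepB.eq_def]
      by_cases hf : PySem.Chars.rfind s w.1 = -1
      · rw [if_pos hf]; exact Or.inl ⟨hf, rfl⟩
      · rw [if_neg hf]
        refine Or.inr ⟨hf, ?_⟩
        cases acc with
        | none => exact Or.inl ⟨rfl, rfl⟩
        | some qe =>
          obtain ⟨q0, e0⟩ := qe
          by_cases hlt : q0 < PySem.Chars.rfind s w.1 + w.1.length
          · exact Or.inr ⟨q0, e0, rfl, Or.inl ⟨hlt, by simp [hlt]⟩⟩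
          · exact Or.inr ⟨q0, e0, rfl, Or.inr ⟨hlt, by simp [hlt]⟩⟩
    constructor
    · intro h
      obtain ⟨hstep, htl⟩ := H.1 h
      have hacc : acc = none ∧ PySem.Chars.rfind s w.1 = -1 := by
        rcases hstep_cases with ⟨hf, he⟩ | ⟨hf, hcs⟩
        · rw [he] at hstep; exact ⟨hstep, hf⟩
        · exfalso
          rcases hcs with ⟨-, he⟩ | ⟨q0, e0, ha, ⟨-, he⟩ | ⟨-, he⟩⟩
          · rw [he] at hstep; simp at hstep
          · rw [he] at hstep; simp at hstep
          · rw [he, ha] at hstep; simp at hstep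
      refine ⟨hacc.1, ?_⟩
      intro wd hwd
      rcases List.mem_cons.mp hwd with rfl | hm
      · exact hacc.2
      · exact htl wd hm
    · intro e d h
      obtain ⟨hsrc, hmax, haccle⟩ := H.2 e d h
      refine ⟨?_, ?_, ?_⟩
      · rcases hsrc with hs | ⟨wd, hwd, h1, h2, h3⟩
        · rcases hstep_cases with ⟨hf, he⟩ | ⟨hf, hcs⟩
          · rw [he] at hs; exact Or.inl hs
          · rcases hcs with ⟨-, he⟩ | ⟨q0, e0, ha, ⟨-, he⟩ | ⟨-, he⟩⟩
            · rw [he] at hs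
              simp only [Option.some.injEq, Prod.mk.injEq] at hs
              exact Or.inr ⟨w, List.mem_cons_self, hf, hs.1.symm, hs.2⟩
            · rw [he] at hs
              simp only [Option.some.injEq, Prod.mk.injEq] at hs
              exact Or.inr ⟨w, List.mem_cons_self, hf, hs.1.symm, hs.2⟩
            · rw [he] at hs; exact Or.inl hs
        · exact Or.inr ⟨wd, List.mem_cons_of_mem _ hwd, h1, h2, h3⟩
      · intro wd hwd hne
        rcases List.mem_cons.mp hwd with rfl | hm
        · rcases hstep_cases with ⟨hf, -⟩ | ⟨-, hcs⟩
          · exact absurd hf hne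
          · rcases hcs with ⟨-, he⟩ | ⟨q0, e0, ha, ⟨hlt, he⟩ | ⟨hlt, he⟩⟩
            · exact haccle _ _ he
            · exact haccle _ _ he
            · have := haccle q0 e0 (by rw [he, ha])
              omega
        · exact hmax wd hm hne
      · intro q e0 hq
        rcases hstep_cases with ⟨-, he⟩ | ⟨-, hcs⟩
        · exact haccle q e0 (by rw [he, hq])
        · rcases hcs with ⟨ha, -⟩ | ⟨q0, e1, ha, ⟨hlt, he⟩ | ⟨hlt, he⟩⟩
          · rw [ha] at hq; simp at hq
          · rw [ha] at hq
            simp only [Option.some.injEq, Prod.mk.injEq] at hq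
            have := haccle _ _ he
            omega
          · rw [ha] at hq
            simp only [Option.some.injEq, Prod.mk.injEq] at hq
            have := haccle q0 e1 (by rw [he, ha])
            omega

-- the two halves
lemma pvFwd_eq_best (s : List Char) :
    pvFwd s 0 = (match pvBestStart s with
      | none => s
      | some (p, d) => s.take p.toNat ++ d :: s.drop p.toNat) := by
  haveI : DecidablePred (fun j : Nat => ∃ wd ∈ pvWords, wd.1 <+: s.drop j) :=
    fun j => by infer_instance
  by_cases hocc : ∃ j : Nat, ∃ wd ∈ pvWords, wd.1 <+: s.drop j
  · obtain ⟨wdx, hwdx, hpx⟩ := Nat.find_spec hocc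
    set j0 := Nat.find hocc with hj0def
    have hmin : ∀ j, j < j0 → ¬ ∃ wd ∈ pvWords, wd.1 <+: s.drop j :=
      fun j hj => Nat.find_min hocc hj
    have hj0len : j0 < s.length := by
      by_contra hcon
      push Not at hcon
      rw [List.drop_eq_nil_iff.mpr (by omega), List.prefix_nil] at hpx
      exact pvWords_ne_nil wdx hwdx hpx
    obtain ⟨wd0, hwd0eq⟩ : ∃ wd0, pvStartHit s j0 = some wd0 := by
      cases hh : pvStartHit s j0 with
      | none =>
        exfalso
        rw [pvStartHit_none_iff] at hh
        exact hh wdx hwdx hpx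
      | some wd0 => exact ⟨wd0, rfl⟩
    obtain ⟨hwd0mem, hwd0pre⟩ := pvStartHit_some hwd0eq
    have hA := pvFwd_of_hit s j0 0 j0 wd0 (by omega) (Nat.zero_le _) hj0len hwd0eq
      (fun j _ hj => pvStartHit_none_iff.mpr (fun wd hwd hp => hmin j hj ⟨wd, hwd, hp⟩))
    cases hB : pvBestStart s with
    | none =>
      exfalso
      have hall := ((pvFoldF_spec s pvWords none).1 hB).2
      have h0 := (pvFind_le_of_prefix hwd0pre).1
      rw [hall wd0 hwd0mem] at h0
      omega
    | some pd =>
      obtain ⟨p, d⟩ := pd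
      obtain ⟨hsrc, hminf, -⟩ := (pvFoldF_spec s pvWords none).2 p d hB
      rcases hsrc with hcon | ⟨wd, hwdmem, hfw, hd, hpne⟩
      · simp at hcon
      · have h0 : 0 ≤ p := by
          have := PySem.Chars.neg_one_le_find s wd.1
          rw [hfw] at this
          omega
        have hfind0 : 0 ≤ PySem.Chars.find s wd.1 := by rw [hfw]; exact h0
        obtain ⟨hpre, -⟩ := PySem.Chars.find_spec hfind0
        have hpre' : wd.1 <+: s.drop p.toNat := by
          have : (PySem.Chars.find s wd.1).toNat = p.toNat := by rw [hfw]
          rwa [this] at hpre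
        have hj0le : j0 ≤ p.toNat := by
          by_contra hcon
          push Not at hcon
          exact hmin p.toNat hcon ⟨wd, hwdmem, hpre'⟩
        have hfw0ne : PySem.Chars.find s wd0.1 ≠ -1 := by
          have := (pvFind_le_of_prefix hwd0pre).1
          omega
        have hple : p ≤ (j0 : Int) :=
          le_trans (hminf wd0 hwd0mem hfw0ne) (pvFind_le_of_prefix hwd0pre).2
        have hpj : p.toNat = j0 := by omega
        have hwdeq : wd = wd0 := pvUniqStart hwdmem hwd0mem (hpj ▸ hpre') hwd0pre
        have hdd : d = wd0.2 := by rw [← hd, hwdeq]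
        rw [hA]
        simp only
        rw [hpj, hdd]
  · have hnone : ∀ j, pvStartHit s j = none :=
      fun j => pvStartHit_none_iff.mpr (fun wd hwd hp => hocc ⟨j, wd, hwd, hp⟩)
    have hA := pvFwd_of_none s s.length 0 (by omega) (fun j _ => hnone j)
    have hfind : ∀ wd ∈ pvWords, PySem.Chars.find s wd.1 = -1 := by
      intro wd hwd
      rw [PySem.Chars.find_eq_neg_one_iff]
      intro hinf
      obtain ⟨j, hj⟩ := (PySem.Chars.exists_prefix_drop_iff_isIn wd.1 s).mpr
        ((PySem.Chars.isIn_iff_infix wd.1 s).mpr hinf)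
      exact hocc ⟨j, wd, hwd, hj⟩
    rw [hA, pvBestStart, pvFoldF_const s pvWords none hfind]

lemma pvBwd_eq_best (s : List Char) :
    pvBwd s s.length = (match pvBestEnd s with
      | none => s
      | some (e, d) => s.take e.toNat ++ d :: s.drop e.toNat) := by
  haveI : DecidablePred (fun i : Nat => ∃ wd ∈ pvWords, wd.1 <:+ s.take i) :=
    fun i => by infer_instance
  by_cases hocc : ∃ i : Nat, ∃ wd ∈ pvWords, wd.1 <:+ s.take i
  · obtain ⟨ix, wdx, hwdx, hsx⟩ := hocc
    have hsx' : wdx.1 <:+ s.take (min ix s.length) := by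
      rcases le_total ix s.length with h | h
      · rwa [min_eq_left h]
      · rw [min_eq_right h, List.take_length]
        rwa [List.take_of_length_le h] at hsx
    set i1 := Nat.findGreatest (fun i : Nat => ∃ wd ∈ pvWords, wd.1 <:+ s.take i) s.length
      with hi1def
    have hP1 : ∃ wd ∈ pvWords, wd.1 <:+ s.take i1 := by
      rw [hi1def]
      exact Nat.findGreatest_spec (P := fun i : Nat => ∃ wd ∈ pvWords, wd.1 <:+ s.take i)
        (min_le_right ix s.length) ⟨wdx, hwdx, hsx'⟩
    have hmax : ∀ k, i1 < k → k ≤ s.length → ¬ ∃ wd ∈ pvWords, wd.1 <:+ s.take k :=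
      fun k h1 h2 => Nat.findGreatest_is_greatest h1 h2
    have hi1len : i1 ≤ s.length := Nat.findGreatest_le s.length
    obtain ⟨wd1, hwd1eq⟩ : ∃ wd1, pvEndHit s i1 = some wd1 := by
      cases hh : pvEndHit s i1 with
      | none =>
        exfalso
        rw [pvEndHit_none_iff] at hh
        obtain ⟨wd, hwd, hsuf⟩ := hP1
        exact hh wd hwd hsuf
      | some wd1 => exact ⟨wd1, rfl⟩
    obtain ⟨hwd1mem, hwd1suf⟩ := pvEndHit_some hwd1eq
    have hwd1ne : wd1.1 ≠ [] := pvWords_ne_nil wd1 hwd1mem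
    obtain ⟨hlen1, hpre1⟩ := (pvEnds_iff hi1len).mp hwd1suf
    have hA := pvBwd_of_hit s s.length i1 wd1 hi1len hwd1eq
      (fun i' h1 h2 => pvEndHit_none_iff.mpr (fun wd hwd hsuf => hmax i' h1 h2 ⟨wd, hwd, hsuf⟩))
    -- wd1's rfind reaches at least i1 - |wd1|
    have hrf1 : PySem.Chars.rfind s wd1.1 ≠ -1 ∧
        (i1 : Int) ≤ PySem.Chars.rfind s wd1.1 + wd1.1.length := by
      rcases pvRfind_spec s wd1.1 hwd1ne with ⟨-, hall⟩ | ⟨q1, hq1b, hq1val, -, hq1max⟩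
      · exact absurd hpre1 (hall _)
      · have hle : i1 - wd1.1.length ≤ q1 := by
          by_contra hcon
          push Not at hcon
          exact hq1max _ hcon hpre1
        constructor
        · rw [hq1val]; omega
        · rw [hq1val]; omega
    cases hB : pvBestEnd s with
    | none =>
      exfalso
      have hall := ((pvFoldB_spec s pvWords none).1 hB).2
      exact hrf1.1 (hall wd1 hwd1mem)
    | some ed =>
      obtain ⟨e, d⟩ := ed
      obtain ⟨hsrc, hmaxf, -⟩ := (pvFoldB_spec s pvWords none).2 e d hB
      rcases hsrc with hcon | ⟨wd, hwdmem, hne, heval, hd⟩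
      · simp at hcon
      · have hwdne : wd.1 ≠ [] := pvWords_ne_nil wd hwdmem
        rcases pvRfind_spec s wd.1 hwdne with ⟨hval, -⟩ | ⟨q, hqb, hqval, hqpre, -⟩
        · exact absurd hval hne
        · -- e = q + |wd|, wd ends at q + |wd| ≤ |s|
          have heq : e = (q : Int) + wd.1.length := by rw [heval, hqval]
          have hends : wd.1 <:+ s.take (q + wd.1.length) := by
            rw [pvEnds_iff (by omega)]
            exact ⟨by omega, by simpa using hqpre⟩
          have hup : q + wd.1.length ≤ i1 := by
            rw [hi1def]
            exact Nat.le_findGreatest (P := fun i : Nat => ∃ wd ∈ pvWords, wd.1 <:+ s.take i)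
              hqb ⟨wd, hwdmem, hends⟩
          have hdown : (i1 : Int) ≤ e := le_trans hrf1.2 (hmaxf wd1 hwd1mem hrf1.1)
          have hei1 : e.toNat = i1 ∧ q + wd.1.length = i1 := by
            constructor <;> omega
          have hendwd : wd.1 <:+ s.take i1 := hei1.2 ▸ hends
          have hwdeq : wd = wd1 := pvUniqEnd hwdmem hwd1mem hendwd hwd1suf
          have hdd : d = wd1.2 := by rw [← hd, hwdeq]
          rw [hA]
          simp only
          rw [hei1.1, hdd]
  · have hnone : ∀ i, pvEndHit s i = none :=
      fun i => pvEndHit_none_iff.mpr (fun wd hwd hsuf => hocc ⟨i, wd, hwd, hsuf⟩)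
    have hA := pvBwd_of_none s s.length (fun i' _ => hnone i')
    have hrf : ∀ wd ∈ pvWords, PySem.Chars.rfind s wd.1 = -1 := by
      intro wd hwd
      rcases pvRfind_spec s wd.1 (pvWords_ne_nil wd hwd) with ⟨hval, -⟩ | ⟨q, hqb, -, hqpre, -⟩
      · exact hval
      · exfalso
        have hwdne : wd.1 ≠ [] := pvWords_ne_nil wd hwd
        have hends : wd.1 <:+ s.take (q + wd.1.length) := by
          rw [pvEnds_iff (by omega)]
          exact ⟨by omega, by simpa using hqpre⟩
        exact hocc ⟨q + wd.1.length, wd, hwd, hends⟩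
    rw [hA, pvBestEnd, pvFoldB_const s pvWords none hrf]

-- no word anywhere forward ⇒ none backward either
lemma pvBestEnd_none_of_noF (s : List Char)
    (h : ∀ wd ∈ pvWords, PySem.Chars.find s wd.1 = -1) : pvBestEnd s = none := by
  have hrf : ∀ wd ∈ pvWords, PySem.Chars.rfind s wd.1 = -1 := by
    intro wd hwd
    rcases pvRfind_spec s wd.1 (pvWords_ne_nil wd hwd) with ⟨hval, -⟩ | ⟨q, -, -, hqpre, -⟩
    · exact hval
    · exfalso
      have := (pvFind_le_of_prefix hqpre).1
      rw [h wd hwd] at this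
      omega
  rw [pvBestEnd, pvFoldB_const s pvWords none hrf]

-- ===== VERDICT (by name: the statement is the Claim_ definition above) =====
theorem replace_word_with_digit_spec : Claim_equal_replace_word_with_digit := by
  intro line _
  show replace_word_with_digit line = replace_word_with_digit_alt line
  unfold replace_word_with_digit replace_word_with_digit_alt
  rw [pvFwd_eq_best]
  cases hB : pvBestStart line.toList with
  | none =>
    have hall := ((pvFoldF_spec line.toList pvWords none).1 hB).2
    simp only
    rw [pvBwd_eq_best, pvBestEnd_none_of_noF line.toList hall, hB, String.ofList_toList]
  | some pd =>
    obtain ⟨p, d⟩ := pd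
    simp only
    rw [pvBwd_eq_best, hB]
    cases hE : pvBestEnd (List.take p.toNat line.toList ++ d :: List.drop p.toNat line.toList) with
    | none => simp only [hE]
    | some ed => obtain ⟨e, d2⟩ := ed; simp only [hE]
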